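-- pv_equiv track=rewrite | github.com/csrcordeiro/DjangoNoseTestRunner | djangotest.py | filter_selected_regions
-- ===== SOURCE A (Python) =====
-- def filter_selected_regions(regions, lines):
--     rr = regions[:]
--     rr.reverse()
--     filtered = []
--     r_end = None
--     for r in rr:
--         for l in lines:
--             if l >= r[0] and (r_end is None or l <= r_end):
--                 filtered.append(r)
--                 break
--         r_end = r[0] - 1
--     filtered.reverse()
--     return filtered
-- ===== SOURCE B (Python) =====
-- import bisect
--
--
-- def filter_selected_regions(regions, lines):
--     s = sorted(lines)
--
--     def go(rs):
--         if not rs: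
--             return []
--         r, rest = rs[0], rs[1:]
--         j = bisect.bisect_left(s, r[0])
--         keep = j < len(s) and (not rest or s[j] <= rest[0][0] - 1)
--         return ([r] if keep else []) + go(rest)
--
--     return go(regions)
-- ===== Notes on version B (the rewrite author's own statement) =====
-- stated objective: faster
-- what changed: Replaces the reversed loop with an inner linear scan of lines per region by sorting lines once and binary-searching (bisect_left) the smallest line >= each region's start, recursing forward over the regions.
import Mathlib
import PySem

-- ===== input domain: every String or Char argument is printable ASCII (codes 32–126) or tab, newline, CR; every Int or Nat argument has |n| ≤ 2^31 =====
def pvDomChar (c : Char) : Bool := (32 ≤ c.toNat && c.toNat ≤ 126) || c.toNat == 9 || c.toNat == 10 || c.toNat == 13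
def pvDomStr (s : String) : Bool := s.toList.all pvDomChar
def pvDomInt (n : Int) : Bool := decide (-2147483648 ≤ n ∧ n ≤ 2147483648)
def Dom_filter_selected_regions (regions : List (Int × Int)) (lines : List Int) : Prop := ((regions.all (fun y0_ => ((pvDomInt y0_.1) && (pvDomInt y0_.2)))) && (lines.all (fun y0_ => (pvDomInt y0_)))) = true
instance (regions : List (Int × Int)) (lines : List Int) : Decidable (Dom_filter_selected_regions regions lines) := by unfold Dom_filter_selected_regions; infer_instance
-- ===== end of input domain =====

-- B sorts the lines once and binary-searches the smallest line in each region's interval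
-- instead of A's reversed loop with an inner linear scan of lines per region (faster).


-- ===== PORT A =====
-- inner 'for l in lines: … break' loop: true iff some line hits the window [r[0], r_end]
def aFind (lines : List Int) (lo : Int) (rend : Option Int) : Bool :=
  match lines with
  | [] => false
  | l :: rest =>
    if decide (lo ≤ l) && (match rend with | none => true | some e => decide (l ≤ e)) then
      true
    else aFind rest lo rend

def filter_selected_regions (regions : List (Int × Int)) (lines : List Int) : List (Int × Int) :=
  let rr := regions.reverse
  let st := rr.foldl
    (fun (st : List (Int × Int) × Option Int) r =>
      ((if aFind lines r.1 st.2 then st.1 ++ [r] else st.1), some (r.1 - 1)))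
    ([], none)
  st.1.reverse

-- ===== PORT B =====
-- 'go' of Source B; s[j] is ported as getD (Source B only reads s[j] after checking j < len(s))
def bGo (s : List Int) : List (Int × Int) → List (Int × Int)
  | [] => []
  | r :: rest =>
    let j := PySem.List.bisectLeft s r.1
    (if j < s.length ∧ (rest = [] ∨ s.getD j 0 ≤ (rest.headD (0, 0)).1 - 1) then [r] else [])
      ++ bGo s rest

def filter_selected_regions_alt (regions : List (Int × Int)) (lines : List Int) : List (Int × Int) :=
  bGo (PySem.List.sorted lines (fun x => x) false) regions

-- ===== PRECONDITION & SPEC =====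
def Spec_filter_selected_regions (regions : List (Int × Int)) (lines : List Int) (out : List (Int × Int)) : Prop := out = filter_selected_regions_alt regions lines
instance (regions : List (Int × Int)) (lines : List Int) (out : List (Int × Int)) : Decidable (Spec_filter_selected_regions regions lines out) := by unfold Spec_filter_selected_regions; infer_instance

-- ===== CLAIM (what is proved, stated in full; the proofs are below) =====
def Claim_equal_filter_selected_regions : Prop := ∀ (regions : List (Int × Int)) (lines : List Int), Dom_filter_selected_regions regions lines → Spec_filter_selected_regions regions lines (filter_selected_regions regions lines)

-- ===== LEMMAS AND PROOFS =====

-- A's inner loop is an existence test over lines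
theorem aFind_eq_any (lines : List Int) (lo : Int) (rend : Option Int) :
    aFind lines lo rend
      = lines.any (fun l => decide (lo ≤ l) && (match rend with | none => true | some e => decide (l ≤ e))) := by
  induction lines with
  | nil => rfl
  | cons l rest ih =>
    simp only [aFind, List.any_cons]
    rw [ih, Bool.if_true_left, Bool.decide_eq_true]

-- key lemma: A's scan of lines equals B's bisect test on the sorted list
theorem aFind_iff_bisect (lines : List Int) (lo : Int) (rend : Option Int) :
    aFind lines lo rend = true ↔
      (PySem.List.bisectLeft (PySem.List.sorted lines (fun x => x) false) lo
          < (PySem.List.sorted lines (fun x => x) false).length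
        ∧ (match rend with
           | none => True
           | some e => (PySem.List.sorted lines (fun x => x) false).getD
                (PySem.List.bisectLeft (PySem.List.sorted lines (fun x => x) false) lo) 0 ≤ e)) := by
  set s := PySem.List.sorted lines (fun x => x) false with hs
  have hperm : s.Perm lines := PySem.List.sorted_perm lines (fun x => x) false
  have hpw : List.Pairwise (· ≤ ·) s := by
    rw [List.pairwise_iff_getElem]
    intro i j hi hj hij
    exact PySem.List.sorted_id_getElem_mono lines (Nat.le_of_lt hij) hj
  obtain ⟨hble, hlt, hge⟩ := PySem.List.bisectLeft_spec s lo hpw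
  set j := PySem.List.bisectLeft s lo with hj
  rw [aFind_eq_any]
  rw [List.any_eq_true]
  constructor
  · rintro ⟨l, hl, hcond⟩
    have hl' : l ∈ s := hperm.mem_iff.mpr hl
    obtain ⟨k, hk, hkl⟩ := List.getElem_of_mem hl'
    simp only [Bool.and_eq_true, decide_eq_true_eq] at hcond
    have hjk : j ≤ k := by
      by_contra hkj
      have := hlt k hk (Nat.lt_of_not_le hkj)
      rw [hkl] at this
      omega
    have hjlen : j < s.length := Nat.lt_of_le_of_lt hjk hk
    refine ⟨hjlen, ?_⟩
    cases rend with
    | none => trivial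
    | some e =>
      simp only at hcond ⊢
      have hmono : s[j] ≤ s[k] :=
        PySem.List.sorted_id_getElem_mono lines hjk hk
      rw [List.getD_eq_getElem _ _ hjlen]
      simp only [decide_eq_true_eq] at hcond
      have : s[k] = l := hkl
      omega
  · rintro ⟨hjlen, hbound⟩
    refine ⟨s[j], hperm.mem_iff.mp (List.getElem_mem hjlen), ?_⟩
    have hlos : lo ≤ s[j] := hge j hjlen (Nat.le_refl j)
    cases rend with
    | none => simp [hlos]
    | some e =>
      simp only at hbound
      rw [List.getD_eq_getElem _ _ hjlen] at hbound
      simp [hlos, hbound]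

-- forward recursion characterising A: each region's window end comes from the next region
def gAE (lines : List Int) : List (Int × Int) → Option Int → List (Int × Int)
  | [], _ => []
  | r :: rest, e =>
    (if aFind lines r.1 (match rest with | [] => e | h :: _ => some (h.1 - 1)) then [r] else [])
      ++ gAE lines rest e

theorem foldl_reverse_eq_gAE (lines : List Int) (rs : List (Int × Int))
    (acc : List (Int × Int)) (e : Option Int) :
    rs.reverse.foldl
      (fun (st : List (Int × Int) × Option Int) r =>
        ((if aFind lines r.1 st.2 then st.1 ++ [r] else st.1), some (r.1 - 1)))
      (acc, e)
    = (acc ++ (gAE lines rs e).reverse,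
       match rs with | [] => e | r0 :: _ => some (r0.1 - 1)) := by
  induction rs generalizing acc e with
  | nil => simp [gAE]
  | cons r rest ih =>
    simp only [List.reverse_cons, List.foldl_append, ih, List.foldl_cons, List.foldl_nil]
    simp only [gAE]
    cases hfind : aFind lines r.1 (match rest with | [] => e | h :: _ => some (h.1 - 1)) with
    | true =>
      cases rest with
      | nil => simp [hfind, gAE]
      | cons h t => simp [hfind]
    | false =>
      cases rest with
      | nil => simp [hfind, gAE]
      | cons h t => simp [hfind]

theorem filter_eq_gAE (regions : List (Int × Int)) (lines : List Int) :
    filter_selected_regions regions lines = gAE lines regions none := by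
  unfold filter_selected_regions
  simp only [foldl_reverse_eq_gAE, List.reverse_append, List.reverse_reverse]
  simp

theorem gAE_eq_bGo (lines : List Int) (regions : List (Int × Int)) :
    gAE lines regions none = bGo (PySem.List.sorted lines (fun x => x) false) regions := by
  induction regions with
  | nil => rfl
  | cons r rest ih =>
    simp only [gAE, bGo, ih]
    congr 1
    set s := PySem.List.sorted lines (fun x => x) false
    cases rest with
    | nil =>
      have h := aFind_iff_bisect lines r.1 none
      by_cases hb : PySem.List.bisectLeft s r.1 < s.length
      · rw [if_pos (h.mpr ⟨hb, trivial⟩), if_pos ⟨hb, Or.inl rfl⟩]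
      · rw [if_neg, if_neg]
        · rintro ⟨hc, -⟩; exact hb hc
        · intro hc
          rcases h.mp hc with ⟨hc1, -⟩
          exact hb hc1
    | cons h0 t =>
      have h := aFind_iff_bisect lines r.1 (some (h0.1 - 1))
      by_cases hb : PySem.List.bisectLeft s r.1 < s.length
          ∧ s.getD (PySem.List.bisectLeft s r.1) 0 ≤ h0.1 - 1
      · rw [if_pos (h.mpr ⟨hb.1, hb.2⟩), if_pos ⟨hb.1, Or.inr (by simpa using hb.2)⟩]
      · rw [if_neg, if_neg]
        · rintro ⟨hc1, hc2⟩
          rcases hc2 with hc2 | hc2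
          · exact List.cons_ne_nil _ _ hc2
          · exact hb ⟨hc1, by simpa using hc2⟩
        · intro hc
          rcases h.mp hc with ⟨hc1, hc2⟩
          exact hb ⟨hc1, hc2⟩

-- ===== VERDICT (by name: the statement is the Claim_ definition above) =====
theorem filter_selected_regions_spec : Claim_equal_filter_selected_regions := by
  intro regions lines _
  unfold Spec_filter_selected_regions filter_selected_regions_alt
  rw [filter_eq_gAE, gAE_eq_bGo]
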